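-- pv_equiv track=rewrite | github.com/3LENDERMAN/Python_projects | race.py | to_different_base
-- ===== SOURCE A (Python) =====
-- def to_different_base(num: int, base: int) -> int:
--     if num == 0: return 0
--     val = 0
--     if base == 5: add = 10
--     else: add = 5
--     power = 1
--     while num > 0:
--         val += (num % base) * power
--         num //= base
--         power *= add
--     return val
-- ===== SOURCE B (Python) =====
-- def to_different_base(num: int, base: int) -> int:
--     if num == 0:
--         return 0
--     add = 10 if base == 5 else 5
--     digits = []
--     while num > 0:
--         digits.append(num % base)
--         num //= base
--     val = 0
--     for d in reversed(digits):
--         val = val * add + d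
--     return val
-- ===== Notes on version B (the rewrite author's own statement) =====
-- stated objective: simpler
-- what changed: B splits A's single accumulate-with-power loop into a digit-collection pass followed by a Horner fold over the reversed digit list, eliminating the power variable.
import Mathlib
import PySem

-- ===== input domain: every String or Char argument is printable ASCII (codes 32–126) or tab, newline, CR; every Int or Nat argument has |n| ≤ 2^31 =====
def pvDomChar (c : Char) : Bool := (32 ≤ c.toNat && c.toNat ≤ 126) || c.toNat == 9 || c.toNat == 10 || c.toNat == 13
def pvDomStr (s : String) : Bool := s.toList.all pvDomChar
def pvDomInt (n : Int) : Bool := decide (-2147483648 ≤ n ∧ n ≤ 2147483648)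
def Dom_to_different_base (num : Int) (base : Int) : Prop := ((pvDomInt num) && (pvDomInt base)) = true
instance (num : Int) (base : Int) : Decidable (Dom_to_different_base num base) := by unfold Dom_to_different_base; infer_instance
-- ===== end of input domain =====

-- B replaces A's single accumulate-with-power loop by a digit-collection pass plus a Horner fold (simpler decomposition, same cost).


-- ===== PORT A =====
-- A's while loop, fuel = num.toNat + 1 (enough: with base ≥ 2 num strictly decreases;
-- with base ≤ -1 the quotient is ≤ 0 after one step; base ∈ {0,1} is excluded by Pre_).
def pvLoopA (fuel : Nat) (num val power add base : Int) : Int :=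
  match fuel with
  | 0 => val
  | f + 1 =>
    if num > 0 then
      pvLoopA f (PySem.Int.floordiv num base) (val + PySem.Int.mod num base * power)
        (power * add) add base
    else val

def to_different_base (num : Int) (base : Int) : Int :=
  if num = 0 then 0
  else pvLoopA (num.toNat + 1) num 0 1 (if base = 5 then 10 else 5) base

-- ===== PORT B =====
-- digit-collection pass (same fuel bound as A's loop)
def pvDigitsB (fuel : Nat) (num base : Int) : List Int :=
  match fuel with
  | 0 => []
  | f + 1 =>
    if num > 0 then
      PySem.Int.mod num base :: pvDigitsB f (PySem.Int.floordiv num base) base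
    else []

def to_different_base_alt (num : Int) (base : Int) : Int :=
  if num = 0 then 0
  else
    let add : Int := if base = 5 then 10 else 5
    let digits := pvDigitsB (num.toNat + 1) num base
    digits.reverse.foldl (fun v d => v * add + d) 0

-- ===== PRECONDITION & SPEC =====
-- Pre_ excludes base = 0 (A raises ZeroDivisionError) and base = 1 (A loops forever) when num > 0.
def Pre_to_different_base (num : Int) (base : Int) : Prop :=
  num ≤ 0 ∨ (base ≠ 0 ∧ base ≠ 1)
instance (num : Int) (base : Int) : Decidable (Pre_to_different_base num base) := by
  unfold Pre_to_different_base; infer_instance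
def pvWitness_to_different_base : Int × Int := (13, 5)

def Spec_to_different_base (num : Int) (base : Int) (out : Int) : Prop := out = to_different_base_alt num base
instance (num : Int) (base : Int) (out : Int) : Decidable (Spec_to_different_base num base out) := by unfold Spec_to_different_base; infer_instance

-- ===== CLAIM (what is proved, stated in full; the proofs are below) =====
def Claim_equal_to_different_base : Prop := ∀ (num : Int) (base : Int), Dom_to_different_base num base → Pre_to_different_base num base → Spec_to_different_base num base (to_different_base num base)

-- ===== LEMMAS AND PROOFS =====

-- Horner value of a least-significant-first digit list
def pvHorner (add : Int) : List Int → Int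
  | [] => 0
  | d :: ds => d + add * pvHorner add ds

theorem pvLoopA_eq_horner (add base : Int) :
    ∀ (fuel : Nat) (num val power : Int),
      pvLoopA fuel num val power add base =
        val + power * pvHorner add (pvDigitsB fuel num base) := by
  intro fuel
  induction fuel with
  | zero => intro num val power; simp [pvLoopA, pvDigitsB, pvHorner]
  | succ f ih =>
    intro num val power
    by_cases h : num > 0
    · simp only [pvLoopA, pvDigitsB, if_pos h, ih, pvHorner]; ring
    · simp [pvLoopA, pvDigitsB, if_neg h, pvHorner]

theorem pvFoldl_reverse_eq_horner (add : Int) :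
    ∀ ds : List Int,
      ds.reverse.foldl (fun v d => v * add + d) 0 = pvHorner add ds := by
  intro ds
  induction ds with
  | nil => simp [pvHorner]
  | cons d ds ih =>
    simp [List.reverse_cons, List.foldl_append, ih, pvHorner]; ring

-- ===== VERDICT (by name: the statement is the Claim_ definition above) =====
theorem to_different_base_spec : Claim_equal_to_different_base := by
  intro num base _ _
  unfold Spec_to_different_base to_different_base to_different_base_alt
  by_cases h0 : num = 0
  · simp [h0]
  · simp only [if_neg h0]
    rw [pvLoopA_eq_horner, pvFoldl_reverse_eq_horner]
    ring
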